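-- pv_equiv track=rewrite | github.com/mevljas/ieps-pa-3 | implementation-indexing/run-sqlite-search.py | find_snippet
-- ===== SOURCE A (Python) =====
-- def find_snippet(document_text: [], indexes: [int]):
--     result = []
--     new_indexes = set()
--     for index in indexes:
--         new_indexes = new_indexes.union(set(range(index - 3, index + 1)))
--         new_indexes = new_indexes.union(set(range(index + 1, index + 4)))
--
--     new_indexes = list(new_indexes)
--     new_indexes.sort()
--     for i in range(0, len(new_indexes)):
--         current_index = new_indexes[i]
--         if i == 0 and current_index > 0:
--             result.append('...')
--         elif i > 0 and current_index - new_indexes[i - 1] > 1: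
--             result.append('...')
--         result.append(document_text[new_indexes[i]])
--
--     if new_indexes[-1] != len(document_text) - 1:
--         result.append('...')
--
--     return " ".join(result)
-- ===== SOURCE B (Python) =====
-- def find_snippet(document_text: [], indexes: [int]):
--     # Merge the sorted match windows [i-3, i+3] into disjoint intervals, then
--     # render each interval once, with '...' separators around uncovered text.
--     intervals = []
--     for i in sorted(indexes):
--         lo, hi = i - 3, i + 3
--         if intervals and lo <= intervals[-1][1] + 1:
--             if hi > intervals[-1][1]:
--                 intervals[-1][1] = hi
--         else:
--             intervals.append([lo, hi])
--     parts = []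
--     for lo, hi in intervals:
--         if parts:
--             parts.append('...')
--         elif lo > 0:
--             parts.append('...')
--         for k in range(lo, hi + 1):
--             parts.append(document_text[k])
--     if intervals[-1][1] != len(document_text) - 1:
--         parts.append('...')
--     return " ".join(parts)
-- ===== Notes on version B (the rewrite author's own statement) =====
-- stated objective: faster
-- what changed: Instead of materialising every covered position in a set, sorting it and re-scanning with index lookback, B sorts the match indexes once, merges their [i-3,i+3] windows into disjoint intervals, and renders each interval with a single range walk.
import Mathlib
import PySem

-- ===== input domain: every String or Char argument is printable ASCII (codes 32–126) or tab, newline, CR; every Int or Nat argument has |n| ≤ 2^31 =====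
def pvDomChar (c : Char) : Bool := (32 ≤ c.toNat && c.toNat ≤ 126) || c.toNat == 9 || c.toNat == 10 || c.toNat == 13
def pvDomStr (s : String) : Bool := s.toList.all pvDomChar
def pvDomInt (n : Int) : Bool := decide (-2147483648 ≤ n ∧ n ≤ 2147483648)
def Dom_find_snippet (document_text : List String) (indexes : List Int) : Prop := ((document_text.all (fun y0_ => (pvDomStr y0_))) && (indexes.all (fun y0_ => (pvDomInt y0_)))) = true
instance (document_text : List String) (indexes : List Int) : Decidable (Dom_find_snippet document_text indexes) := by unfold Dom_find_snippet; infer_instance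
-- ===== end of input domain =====

-- B merges the sorted match windows into disjoint intervals and renders each once,
-- avoiding A's quadratic set accumulation; return values agree on all of Pre_.

-- ===== PORT A =====
-- one iteration of A's rendering loop over the sorted position list ni (i is the loop index)
def aStep (document_text : List String) (ni : List Int) (result : List String) (i : Int) : List String :=
  let current := PySem.List.pyGetD ni i 0
  let result :=
    if i == 0 && decide (0 < current) then result ++ ["..."]
    else if decide (0 < i) && decide (1 < current - PySem.List.pyGetD ni (i - 1) 0) then
      result ++ ["..."]
    else result
  result ++ [PySem.List.pyGetD document_text current ""]

def find_snippet (document_text : List String) (indexes : List Int) : String :=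
  let new_indexes : PySem.Set Int :=
    indexes.foldl (fun s index =>
      let s := PySem.Set.union s (PySem.Set.ofList (PySem.List.pyRange (index - 3) (index + 1) 1))
      PySem.Set.union s (PySem.Set.ofList (PySem.List.pyRange (index + 1) (index + 4) 1)))
      PySem.Set.empty
  let ni := PySem.List.sorted new_indexes (fun x => x) false
  let result : List String :=
    (PySem.List.pyRange 0 (ni.length : Int) 1).foldl (aStep document_text ni) []
  let result :=
    if PySem.List.pyGetD ni (-1) 0 ≠ (document_text.length : Int) - 1 then result ++ ["..."]
    else result
  PySem.Str.join " " result

-- ===== PORT B =====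
-- one iteration of B's merging loop; acc holds the intervals in REVERSED order
-- (Python appends/mutates the last list entry; here we cons/replace the head)
def bMerge (acc : List (Int × Int)) (i : Int) : List (Int × Int) :=
  match acc with
  | (lo, hi) :: rest =>
      if i - 3 ≤ hi + 1 then
        if hi < i + 3 then (lo, i + 3) :: rest else (lo, hi) :: rest
      else (i - 3, i + 3) :: (lo, hi) :: rest
  | [] => [(i - 3, i + 3)]

-- one iteration of B's rendering loop over the merged intervals
def bRender (document_text : List String) (parts : List String) (q : Int × Int) : List String :=
  let parts :=
    if parts ≠ [] then parts ++ ["..."]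
    else if decide (0 < q.1) then parts ++ ["..."]
    else parts
  parts ++ (PySem.List.pyRange q.1 (q.2 + 1) 1).map (fun k => PySem.List.pyGetD document_text k "")

def find_snippet_alt (document_text : List String) (indexes : List Int) : String :=
  let intervals :=
    ((PySem.List.sorted indexes (fun x => x) false).foldl bMerge []).reverse
  let parts := intervals.foldl (bRender document_text) []
  let parts :=
    if (PySem.List.pyGetD intervals (-1) (0, 0)).2 ≠ (document_text.length : Int) - 1 then
      parts ++ ["..."]
    else parts
  PySem.Str.join " " parts

-- ===== PRECONDITION & SPEC =====
-- Pre_ excludes exactly the inputs where Python A raises IndexError: empty indexes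
-- (new_indexes[-1] on an empty list) and any index whose window [i-3, i+3] leaves
-- Python's valid index range [-len, len-1] for document_text.
def Pre_find_snippet (document_text : List String) (indexes : List Int) : Prop :=
  indexes ≠ [] ∧ ∀ i ∈ indexes,
    -(document_text.length : Int) ≤ i - 3 ∧ i + 3 < (document_text.length : Int)

instance (document_text : List String) (indexes : List Int) :
    Decidable (Pre_find_snippet document_text indexes) := by
  unfold Pre_find_snippet; infer_instance

def pvWitness_find_snippet : List String × List Int :=
  (["a", "b", "c", "d", "e", "f", "g", "h"], [3])

def Spec_find_snippet (document_text : List String) (indexes : List Int) (out : String) : Prop :=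
  out = find_snippet_alt document_text indexes

instance (document_text : List String) (indexes : List Int) (out : String) :
    Decidable (Spec_find_snippet document_text indexes out) := by
  unfold Spec_find_snippet; infer_instance

-- ===== CLAIM (what is proved, stated in full; the proofs are below) =====
def Claim_equal_find_snippet : Prop := ∀ (document_text : List String) (indexes : List Int), Dom_find_snippet document_text indexes → Pre_find_snippet document_text indexes → Spec_find_snippet document_text indexes (find_snippet document_text indexes)

-- ===== LEMMAS AND PROOFS =====

-- canonical rendering of a strictly increasing position list (proof-only device)
def renderAux (dt : List String) (p : Int) : List Int → List String
  | [] => []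
  | k :: rest =>
      (if 1 < k - p then ["..."] else []) ++ [PySem.List.pyGetD dt k ""] ++ renderAux dt k rest

def render (dt : List String) : List Int → List String
  | [] => []
  | k :: rest =>
      (if 0 < k then ["..."] else []) ++ [PySem.List.pyGetD dt k ""] ++ renderAux dt k rest

-- the positions covered by an interval list
def points (I : List (Int × Int)) : List Int :=
  I.flatMap (fun q => PySem.List.pyRange q.1 (q.2 + 1) 1)

-- well-formed interval list: nonempty intervals, consecutive gaps ≥ 2
def WF (I : List (Int × Int)) : Prop :=
  (∀ q ∈ I, q.1 ≤ q.2) ∧ I.IsChain (fun a b => a.2 + 2 ≤ b.1)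

-- invariant of B's merging fold: acc holds, reversed, the merged intervals of
-- the windows of the processed (ascending) prefix l
def MergeInv (l : List Int) (acc : List (Int × Int)) : Prop :=
  (acc = [] ↔ l = []) ∧
  (∀ q ∈ acc, q.1 ≤ q.2) ∧
  acc.IsChain (fun a b => b.2 + 2 ≤ a.1) ∧
  (∀ lo hi rest, acc = (lo, hi) :: rest → hi = l.getLastD 0 + 3 ∧ ∃ i ∈ l, lo = i - 3) ∧
  (∀ k : Int, (∃ q ∈ acc, q.1 ≤ k ∧ k ≤ q.2) ↔ ∃ i ∈ l, i - 3 ≤ k ∧ k ≤ i + 3)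

theorem lastq_cons {α : Type} (k : α) (S : List α) (p : α) :
    (k :: S).getLast?.getD p = S.getLast?.getD k := by
  cases S with
  | nil => simp
  | cons a T =>
    rcases h : (a :: T).getLast? with _ | v
    · simp [List.getLast?_eq_none_iff] at h
    · simp [List.getLast?_cons_cons, h]

theorem lastD_eq_getLast {α : Type} (l : List α) (d : α) (h : l ≠ []) : l.getLastD d = l.getLast h := by
  simp [List.getLastD_eq_getLast?, List.getLast?_eq_some_getLast (h := h)]

theorem pyGetD_neg_one_lastD {α : Type} (xs : List α) (h : xs ≠ []) (d : α) :
    PySem.List.pyGetD xs (-1) d = xs.getLastD d := by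
  rw [PySem.List.pyGetD_neg_one (h := h), lastD_eq_getLast]

theorem lastD_mem {α : Type} (l : List α) (d : α) (h : l ≠ []) : l.getLastD d ∈ l := by
  rw [lastD_eq_getLast _ _ h]; exact List.getLast_mem h

theorem pyRange_run_ne_nil (a b : Int) (h : a ≤ b) : PySem.List.pyRange a (b + 1) 1 ≠ [] := by
  have hl := PySem.List.length_pyRange_one a (b + 1)
  intro hn; rw [hn] at hl; simp at hl; omega

-- pyGetD into the untouched prefix of an appended list
theorem pyGetD_append_lt {α : Type} (S : List α) (x : α) (i : Int) (d : α)
    (h0 : 0 ≤ i) (h1 : i < S.length) :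
    PySem.List.pyGetD (S ++ [x]) i d = PySem.List.pyGetD S i d := by
  obtain ⟨n, rfl⟩ : ∃ n : Nat, i = (n : Int) := ⟨i.toNat, by omega⟩
  have hn : n < S.length := by exact_mod_cast h1
  simp [PySem.List.pyGetD_natCast, List.getD_eq_getElem?_getD, List.getElem?_append_left hn]


theorem lastD_append {α : Type} (l m : List α) (h : m ≠ []) (d : α) :
    (l ++ m).getLastD d = m.getLastD d := by
  rw [lastD_eq_getLast _ _ (by simp [h]), lastD_eq_getLast _ _ h, List.getLast_append_of_ne_nil]

theorem lastD_cons_of_ne {α : Type} (q : α) (I : List α) (h : I ≠ []) (d : α) :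
    (q :: I).getLastD d = I.getLastD d := by
  rw [show q :: I = [q] ++ I by simp, lastD_append _ _ h]

theorem wf_tail (q : Int × Int) (I : List (Int × Int)) (h : WF (q :: I)) : WF I := by
  refine ⟨fun r hr => h.1 r (List.mem_cons_of_mem _ hr), ?_⟩
  cases I with
  | nil => simp
  | cons r I' => exact (List.isChain_cons_cons.mp h.2).2

-- ===== A-side: the indexed loop is the canonical rendering =====

theorem renderAux_append_last (dt : List String) (S : List Int) (p x : Int) :
    renderAux dt p (S ++ [x]) =
      renderAux dt p S ++ (if 1 < x - S.getLastD p then ["..."] else []) ++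
        [PySem.List.pyGetD dt x ""] := by
  induction S generalizing p with
  | nil => simp [renderAux]
  | cons k S' ih => simp [renderAux, ih k, lastq_cons]


theorem render_append_last (dt : List String) (S : List Int) (x : Int) (h : S ≠ []) :
    render dt (S ++ [x]) =
      render dt S ++ (if 1 < x - S.getLastD 0 then ["..."] else []) ++
        [PySem.List.pyGetD dt x ""] := by
  cases S with
  | nil => exact absurd rfl h
  | cons k S' => simp [render, renderAux_append_last, lastq_cons]


theorem pyGetD_last_idx (S : List Int) (h : S ≠ []) (d : Int) :
    PySem.List.pyGetD S ((S.length : Int) - 1) d = S.getLastD d := by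
  have hl : 0 < S.length := List.length_pos_of_ne_nil h
  rw [PySem.List.pyGetD_eq_getElem (h0 := by omega) (h1 := by omega)]
  rw [lastD_eq_getLast _ _ h, List.getLast_eq_getElem]
  congr 1
  omega

theorem aLoop_eq_render (dt : List String) (S : List Int) :
    (PySem.List.pyRange 0 (S.length : Int) 1).foldl (aStep dt S) [] = render dt S := by
  induction S using List.reverseRecOn with
  | nil => simp [PySem.List.pyRange_one_eq_nil, render]
  | append_singleton S x ih =>
    have hlen : (((S ++ [x]).length : Int)) = (S.length : Int) + 1 := by simp
    rw [hlen, PySem.List.pyRange_one_succ_right (by positivity), List.foldl_append]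
    have hcong : (PySem.List.pyRange 0 (S.length : Int) 1).foldl (aStep dt (S ++ [x])) [] =
        (PySem.List.pyRange 0 (S.length : Int) 1).foldl (aStep dt S) [] := by
      apply PySem.List.foldl_congr_mem
      intro acc i hi
      have hi' := PySem.List.mem_pyRange_one.mp hi
      unfold aStep
      rw [pyGetD_append_lt S x i 0 hi'.1 (by exact_mod_cast hi'.2)]
      by_cases h0 : 0 < i
      · rw [pyGetD_append_lt S x (i - 1) 0 (by omega) (by omega)]
      · have hz : i = 0 := by omega
        subst hz
        simp
    rw [hcong, ih, List.foldl_cons, List.foldl_nil]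
    unfold aStep
    have hcur : PySem.List.pyGetD (S ++ [x]) ((S.length : Int)) 0 = x := by
      rw [PySem.List.pyGetD_eq_getElem (h0 := by positivity) (h1 := by simp)]
      simp
    rw [hcur]
    by_cases hS : S = []
    · subst hS
      by_cases hx : 0 < x <;> simp [hx, render, renderAux]
    · have hl0 : 0 < S.length := List.length_pos_of_ne_nil hS
      have hprev : PySem.List.pyGetD (S ++ [x]) ((S.length : Int) - 1) 0 = S.getLastD 0 := by
        rw [pyGetD_append_lt S x _ 0 (by omega) (by omega), pyGetD_last_idx S hS]
      rw [hprev, render_append_last dt S x hS]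
      have hb0 : (((S.length : Int)) == 0) = false := by
        simp [hS]
      rw [hb0]
      by_cases hg : 1 < x - S.getLast?.getD 0
      · simp [hg, hl0]
      · simp [hg]


-- ===== B-side: rendering a well-formed interval list =====

theorem renderAux_run (dt : List String) (n : Nat) :
    ∀ (lo : Int) (rest : List Int),
      [PySem.List.pyGetD dt lo ""] ++
          renderAux dt lo (PySem.List.pyRange (lo + 1) (lo + n + 1) 1 ++ rest) =
        (PySem.List.pyRange lo (lo + n + 1) 1).map (fun k => PySem.List.pyGetD dt k "") ++
          renderAux dt (lo + n) rest := by
  induction n with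
  | zero =>
    intro lo rest
    rw [show lo + ((0 : Nat) : Int) + 1 = lo + 1 by push_cast; ring,
      PySem.List.pyRange_one_eq_nil (le_refl (lo + 1)), PySem.List.pyRange_one_singleton]
    simp
  | succ m ih =>
    intro lo rest
    rw [show lo + ((m + 1 : Nat) : Int) + 1 = lo + 1 + (m : Nat) + 1 by push_cast; ring]
    rw [PySem.List.pyRange_one_cons (by omega : lo + 1 < lo + 1 + (m : Nat) + 1)]
    have hstep : renderAux dt lo (((lo + 1) :: PySem.List.pyRange (lo + 1 + 1) (lo + 1 + (m : Nat) + 1) 1) ++ rest) =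
        [PySem.List.pyGetD dt (lo + 1) ""] ++
          renderAux dt (lo + 1) (PySem.List.pyRange (lo + 1 + 1) (lo + 1 + (m : Nat) + 1) 1 ++ rest) := by
      simp [renderAux]
    rw [hstep, ih (lo + 1) rest]
    rw [PySem.List.pyRange_one_cons (by omega : lo < lo + 1 + (m : Nat) + 1)]
    rw [show lo + ((m + 1 : Nat) : Int) = lo + 1 + (m : Nat) by push_cast; ring]
    simp

theorem renderAux_run' (dt : List String) (lo hi : Int) (rest : List Int) (h : lo ≤ hi) :
    [PySem.List.pyGetD dt lo ""] ++
        renderAux dt lo (PySem.List.pyRange (lo + 1) (hi + 1) 1 ++ rest) =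
      (PySem.List.pyRange lo (hi + 1) 1).map (fun k => PySem.List.pyGetD dt k "") ++
        renderAux dt hi rest := by
  obtain ⟨n, rfl⟩ : ∃ n : Nat, hi = lo + n := ⟨(hi - lo).toNat, by omega⟩
  exact renderAux_run dt n lo rest


theorem renderAux_interval (dt : List String) (lo hi p : Int) (rest : List Int) (h : lo ≤ hi) :
    renderAux dt p (PySem.List.pyRange lo (hi + 1) 1 ++ rest) =
      (if 1 < lo - p then ["..."] else []) ++
        (PySem.List.pyRange lo (hi + 1) 1).map (fun k => PySem.List.pyGetD dt k "") ++
        renderAux dt hi rest := by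
  rw [PySem.List.pyRange_one_cons (by omega : lo < hi + 1)]
  have hstep : renderAux dt p (lo :: (PySem.List.pyRange (lo + 1) (hi + 1) 1 ++ rest)) =
      (if 1 < lo - p then ["..."] else []) ++
        ([PySem.List.pyGetD dt lo ""] ++
          renderAux dt lo (PySem.List.pyRange (lo + 1) (hi + 1) 1 ++ rest)) := by
    simp [renderAux]
  rw [List.cons_append, hstep, renderAux_run' dt lo hi rest h,
    PySem.List.pyRange_one_cons (by omega : lo < hi + 1)]
  simp


theorem bLoop_aux (dt : List String) (I : List (Int × Int)) :
    ∀ (parts : List String) (p : Int), WF I → parts ≠ [] →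
      (∀ q ∈ I.head?, p + 2 ≤ q.1) →
      I.foldl (bRender dt) parts = parts ++ renderAux dt p (points I) := by
  induction I with
  | nil => intro parts p _ _ _; simp [points, renderAux]
  | cons q I' ih =>
    intro parts p hwf hparts hp
    obtain ⟨lo, hi⟩ := q
    have hlh : lo ≤ hi := hwf.1 (lo, hi) (by simp)
    have hplo : p + 2 ≤ lo := by simpa using hp (lo, hi) (by simp)
    rw [List.foldl_cons]
    have hstep : bRender dt parts (lo, hi) = parts ++ ["..."] ++
        (PySem.List.pyRange lo (hi + 1) 1).map (fun k => PySem.List.pyGetD dt k "") := by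
      simp [bRender, hparts]
    rw [hstep]
    rw [ih _ hi (wf_tail _ _ hwf) (by simp) ?hd]
    case hd =>
      intro r hr
      cases I' with
      | nil => simp at hr
      | cons r0 I'' =>
        simp only [List.head?_cons, Option.mem_def, Option.some.injEq] at hr
        subst hr
        exact (List.isChain_cons_cons.mp hwf.2).1
    simp only [points, List.flatMap_cons]
    rw [renderAux_interval dt lo hi p _ hlh, if_pos (by omega : 1 < lo - p)]
    simp


theorem bLoop_eq_render (dt : List String) (I : List (Int × Int)) (hwf : WF I) (hne : I ≠ []) :
    I.foldl (bRender dt) [] = render dt (points I) := by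
  cases I with
  | nil => exact absurd rfl hne
  | cons q I' =>
    obtain ⟨lo, hi⟩ := q
    have hlh : lo ≤ hi := hwf.1 (lo, hi) (by simp)
    rw [List.foldl_cons]
    have hstep : bRender dt [] (lo, hi) = ((if 0 < lo then ["..."] else []) ++
        (PySem.List.pyRange lo (hi + 1) 1).map (fun k => PySem.List.pyGetD dt k "")) := by
      by_cases h0 : 0 < lo <;> simp [bRender, h0]
    rw [hstep]
    have hmne : ((PySem.List.pyRange lo (hi + 1) 1).map (fun k => PySem.List.pyGetD dt k "")) ≠ [] := by
      simp [pyRange_run_ne_nil lo hi hlh]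
    rw [bLoop_aux dt I' _ hi (wf_tail _ _ hwf)
      (by intro hc; exact hmne (List.append_eq_nil_iff.mp hc).2) ?hd2]
    case hd2 =>
      intro r hr
      cases I' with
      | nil => simp at hr
      | cons r0 I'' =>
        simp only [List.head?_cons, Option.mem_def, Option.some.injEq] at hr
        subst hr
        exact (List.isChain_cons_cons.mp hwf.2).1
    simp only [points, List.flatMap_cons]
    rw [PySem.List.pyRange_one_cons (by omega : lo < hi + 1), List.cons_append]
    have hrend : render dt (lo :: (PySem.List.pyRange (lo + 1) (hi + 1) 1 ++
        I'.flatMap fun s => PySem.List.pyRange s.1 (s.2 + 1) 1)) =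
        (if 0 < lo then ["..."] else []) ++ ([PySem.List.pyGetD dt lo ""] ++
          renderAux dt lo (PySem.List.pyRange (lo + 1) (hi + 1) 1 ++
            I'.flatMap fun s => PySem.List.pyRange s.1 (s.2 + 1) 1)) := by
      simp [render]
    rw [hrend, renderAux_run' dt lo hi _ hlh,
      PySem.List.pyRange_one_cons (by omega : lo < hi + 1)]
    simp


-- ===== merging invariant =====

theorem inv_step (l : List Int) (acc : List (Int × Int)) (t : Int)
    (h : MergeInv l acc) (hle : ∀ i ∈ l, i ≤ t) : MergeInv (l ++ [t]) (bMerge acc t) := by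
  obtain ⟨h1, h2, h3, h4, h5⟩ := h
  have hlastT : (l ++ [t]).getLastD 0 = t := by
    rw [lastD_append _ [t] (by simp) 0]; rfl
  cases acc with
  | nil =>
    have hl : l = [] := h1.mp rfl
    subst hl
    refine ⟨by simp [bMerge], ?_, by simp [bMerge], ?_, ?_⟩
    · intro q hq
      simp only [bMerge, List.mem_singleton] at hq
      subst hq
      simp
      omega
    · intro lo hi rest heq
      simp only [bMerge, List.cons.injEq, Prod.mk.injEq] at heq
      obtain ⟨⟨e1, e2⟩, e3⟩ := heq
      exact ⟨by simp [← e2], ⟨t, by simp, by omega⟩⟩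
    · intro k
      simp [bMerge]
  | cons q rest =>
    obtain ⟨lo, hi⟩ := q
    have hlne : l ≠ [] := fun hl => absurd (h1.mpr hl) (by simp)
    obtain ⟨hhi, i0, hi0mem, hlo⟩ := h4 lo hi rest rfl
    have hlastmem := lastD_mem l 0 hlne
    have hhile : hi ≤ t + 3 := by have := hle _ hlastmem; omega
    have hlot : lo ≤ t - 3 := by have := hle _ hi0mem; omega
    have hlohi : lo ≤ hi := h2 (lo, hi) (by simp)
    by_cases hm : t - 3 ≤ hi + 1
    · by_cases hup : hi < t + 3
      · -- merge and extend the last interval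
        have hbm : bMerge ((lo, hi) :: rest) t = (lo, t + 3) :: rest := by
          simp [bMerge, hm, hup]
        rw [hbm]
        refine ⟨by simp, ?_, ?_, ?_, ?_⟩
        · intro r hr
          rcases List.mem_cons.mp hr with rfl | hr'
          · simp; omega
          · exact h2 r (List.mem_cons_of_mem _ hr')
        · cases rest with
          | nil => simp
          | cons r0 rest' =>
            exact List.isChain_cons_cons.mpr
              ⟨(List.isChain_cons_cons.mp h3).1, (List.isChain_cons_cons.mp h3).2⟩
        · intro lo' hi' rest' heq
          simp only [List.cons.injEq, Prod.mk.injEq] at heq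
          obtain ⟨⟨e1, e2⟩, e3⟩ := heq
          refine ⟨by rw [hlastT]; omega, ⟨i0, by simp [hi0mem], by omega⟩⟩
        · intro k
          constructor
          · rintro ⟨r, hr, hr1, hr2⟩
            rcases List.mem_cons.mp hr with rfl | hr'
            · have hr1' : lo ≤ k := hr1
              have hr2' : k ≤ t + 3 := hr2
              by_cases hk : k ≤ hi
              · obtain ⟨i, hil, hw⟩ := (h5 k).mp ⟨(lo, hi), by simp, hr1', hk⟩
                exact ⟨i, by simp [hil], hw⟩
              · exact ⟨t, by simp, by omega, by omega⟩
            · obtain ⟨i, hil, hw⟩ := (h5 k).mp ⟨r, by simp [hr'], hr1, hr2⟩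
              exact ⟨i, by simp [hil], hw⟩
          · rintro ⟨i, hil, hw⟩
            rcases List.mem_append.mp hil with hil' | hit
            · obtain ⟨r, hr, hr1, hr2⟩ := (h5 k).mpr ⟨i, hil', hw⟩
              rcases List.mem_cons.mp hr with rfl | hr'
              · have hr2' : k ≤ hi := hr2
                exact ⟨(lo, t + 3), by simp, hr1, by omega⟩
              · exact ⟨r, by simp [hr'], hr1, hr2⟩
            · have hit' : i = t := by simpa using hit
              exact ⟨(lo, t + 3), by simp, by omega, by omega⟩
      · -- the new window is already inside the last interval
        have ht3 : hi = t + 3 := by omega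
        have hbm : bMerge ((lo, hi) :: rest) t = (lo, hi) :: rest := by
          simp [bMerge, hm, hup]
        rw [hbm]
        refine ⟨by simp, h2, h3, ?_, ?_⟩
        · intro lo' hi' rest' heq
          simp only [List.cons.injEq, Prod.mk.injEq] at heq
          obtain ⟨⟨e1, e2⟩, e3⟩ := heq
          refine ⟨by rw [hlastT]; omega, ⟨i0, by simp [hi0mem], by omega⟩⟩
        · intro k
          constructor
          · rintro ⟨r, hr, hr1, hr2⟩
            obtain ⟨i, hil, hw⟩ := (h5 k).mp ⟨r, hr, hr1, hr2⟩
            exact ⟨i, by simp [hil], hw⟩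
          · rintro ⟨i, hil, hw⟩
            rcases List.mem_append.mp hil with hil' | hit
            · exact (h5 k).mpr ⟨i, hil', hw⟩
            · have hit' : i = t := by simpa using hit
              exact ⟨(lo, hi), by simp, by omega, by omega⟩
    · -- start a new interval
      have hbm : bMerge ((lo, hi) :: rest) t = (t - 3, t + 3) :: (lo, hi) :: rest := by
        simp [bMerge, hm]
      rw [hbm]
      refine ⟨by simp, ?_, ?_, ?_, ?_⟩
      · intro r hr
        rcases List.mem_cons.mp hr with rfl | hr'
        · simp; omega
        · exact h2 r hr'
      · exact List.isChain_cons_cons.mpr ⟨by simp; omega, h3⟩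
      · intro lo' hi' rest' heq
        simp only [List.cons.injEq, Prod.mk.injEq] at heq
        obtain ⟨⟨e1, e2⟩, e3⟩ := heq
        refine ⟨by rw [hlastT]; omega, ⟨t, by simp, by omega⟩⟩
      · intro k
        constructor
        · rintro ⟨r, hr, hr1, hr2⟩
          rcases List.mem_cons.mp hr with rfl | hr'
          · exact ⟨t, by simp, hr1, hr2⟩
          · obtain ⟨i, hil, hw⟩ := (h5 k).mp ⟨r, hr', hr1, hr2⟩
            exact ⟨i, by simp [hil], hw⟩
        · rintro ⟨i, hil, hw⟩
          rcases List.mem_append.mp hil with hil' | hit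
          · obtain ⟨r, hr, hr1, hr2⟩ := (h5 k).mpr ⟨i, hil', hw⟩
            exact ⟨r, List.mem_cons_of_mem _ hr, hr1, hr2⟩
          · have hit' : i = t := by simpa using hit
            exact ⟨(t - 3, t + 3), by simp, by omega, by omega⟩


theorem inv_foldl (l : List Int) (hs : l.Pairwise (· ≤ ·)) : MergeInv l (l.foldl bMerge []) := by
  induction l using List.reverseRecOn with
  | nil => exact ⟨by simp, by simp, by simp, by simp, by simp⟩
  | append_singleton l t ihl =>
    rw [List.foldl_append, List.foldl_cons, List.foldl_nil]
    have hp := List.pairwise_append.mp hs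
    exact inv_step l _ t (ihl hp.1) (fun i hi => hp.2.2 i hi t (by simp))


-- ===== structure of the merged intervals =====

theorem wf_of_inv (l : List Int) (acc : List (Int × Int)) (h : MergeInv l acc) : WF acc.reverse := by
  obtain ⟨-, h2, h3, -, -⟩ := h
  refine ⟨fun q hq => h2 q (List.mem_reverse.mp hq), ?_⟩
  exact List.isChain_reverse.mpr h3


theorem mem_points (I : List (Int × Int)) (k : Int) :
    k ∈ points I ↔ ∃ q ∈ I, q.1 ≤ k ∧ k ≤ q.2 := by
  simp only [points, List.mem_flatMap, PySem.List.mem_pyRange_one]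
  constructor
  · rintro ⟨q, hq, h1, h2⟩; exact ⟨q, hq, h1, by omega⟩
  · rintro ⟨q, hq, h1, h2⟩; exact ⟨q, hq, h1, by omega⟩

theorem points_ne_nil (I : List (Int × Int)) (hwf : WF I) (hne : I ≠ []) : points I ≠ [] := by
  cases I with
  | nil => exact absurd rfl hne
  | cons q I' =>
    have hlh : q.1 ≤ q.2 := hwf.1 q (by simp)
    simp only [points, List.flatMap_cons]
    intro hc
    exact pyRange_run_ne_nil q.1 q.2 hlh (List.append_eq_nil_iff.mp hc).1

theorem points_head_lb_aux (I' : List (Int × Int)) :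
    ∀ q0, WF (q0 :: I') → ∀ q ∈ q0 :: I', q0.1 ≤ q.1 := by
  induction I' with
  | nil => intro q0 _ q hq; simp at hq; subst hq; exact le_refl _
  | cons q1 I'' ih =>
    intro q0 hwf q hq
    have h01 : q0.2 + 2 ≤ q1.1 := (List.isChain_cons_cons.mp hwf.2).1
    have hq0 : q0.1 ≤ q0.2 := hwf.1 q0 (by simp)
    rcases List.mem_cons.mp hq with rfl | hq'
    · exact le_refl _
    · have := ih q1 (wf_tail q0 _ hwf) q hq'
      omega

theorem points_head_lb (I : List (Int × Int)) (hwf : WF I) :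
    ∀ q0, I.head? = some q0 → ∀ q ∈ I, q0.1 ≤ q.1 := by
  intro q0 hh q hq
  cases I with
  | nil => simp at hh
  | cons r I' =>
    simp only [List.head?_cons, Option.some.injEq] at hh
    subst hh
    exact points_head_lb_aux I' _ hwf q hq


theorem points_pairwise (I : List (Int × Int)) (hwf : WF I) : (points I).Pairwise (· < ·) := by
  induction I with
  | nil => simp [points]
  | cons q I' ih =>
    simp only [points, List.flatMap_cons]
    rw [List.pairwise_append]
    refine ⟨PySem.List.pairwise_lt_pyRange_one _ _, ih (wf_tail q I' hwf), ?_⟩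
    intro a ha b hb
    have ha' : a ≤ q.2 := by
      have := (PySem.List.mem_pyRange_one).mp ha; omega
    rw [show (I'.flatMap fun r => PySem.List.pyRange r.1 (r.2 + 1) 1) = points I' from rfl] at hb
    obtain ⟨r, hr, hr1, _⟩ := (mem_points I' b).mp hb
    cases I' with
    | nil => simp at hr
    | cons r0 I'' =>
      have hchain : q.2 + 2 ≤ r0.1 := (List.isChain_cons_cons.mp hwf.2).1
      have := points_head_lb (r0 :: I'') (wf_tail q _ hwf) r0 (by simp) r hr
      omega




theorem points_lastD (I : List (Int × Int)) (hwf : WF I) (hne : I ≠ []) :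
    (points I).getLastD 0 = (I.getLastD (0, 0)).2 := by
  induction I with
  | nil => exact absurd rfl hne
  | cons q I' ih =>
    have hlh : q.1 ≤ q.2 := hwf.1 q (by simp)
    cases I' with
    | nil =>
      simp only [points, List.flatMap_cons, List.flatMap_nil, List.append_nil]
      rw [PySem.List.pyRange_one_succ_right (by omega : q.1 ≤ q.2)]
      simp
    | cons r I'' =>
      have hwf' : WF (r :: I'') := wf_tail q _ hwf
      have hne' : points (r :: I'') ≠ [] := points_ne_nil _ hwf' (by simp)
      simp only [points, List.flatMap_cons]
      rw [show (PySem.List.pyRange r.1 (r.2 + 1) 1 ++ I''.flatMap fun s => PySem.List.pyRange s.1 (s.2 + 1) 1) = points (r :: I'') from rfl]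
      rw [lastD_append _ _ hne', lastD_cons_of_ne _ _ (by simp)]
      exact ih hwf' (by simp)


-- ===== A's set of positions =====

theorem mem_aSet_aux (l : List Int) :
    ∀ (s : PySem.Set Int) (k : Int),
      (k ∈ l.foldl (fun s index =>
          let s := PySem.Set.union s (PySem.Set.ofList (PySem.List.pyRange (index - 3) (index + 1) 1))
          PySem.Set.union s (PySem.Set.ofList (PySem.List.pyRange (index + 1) (index + 4) 1))) s)
        ↔ k ∈ s ∨ ∃ i ∈ l, i - 3 ≤ k ∧ k ≤ i + 3 := by
  induction l with
  | nil => intro s k; simp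
  | cons j l ih =>
    intro s k
    rw [List.foldl_cons, ih]
    simp only [PySem.Set.mem_union, PySem.Set.mem_ofList, PySem.List.mem_pyRange_one,
      List.mem_cons]
    constructor
    · rintro (((hs | h1) | h2) | ⟨i, hi, hw⟩)
      · exact Or.inl hs
      · exact Or.inr ⟨j, Or.inl rfl, by omega⟩
      · exact Or.inr ⟨j, Or.inl rfl, by omega⟩
      · exact Or.inr ⟨i, Or.inr hi, hw⟩
    · rintro (hs | ⟨i, (rfl | hi), hw⟩)
      · exact Or.inl (Or.inl (Or.inl hs))
      · by_cases hk : k < i + 1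
        · exact Or.inl (Or.inl (Or.inr (by omega)))
        · exact Or.inl (Or.inr (by omega))
      · exact Or.inr ⟨i, hi, hw⟩

theorem mem_aSet (indexes : List Int) (k : Int) :
    (k ∈ indexes.foldl (fun s index =>
        let s := PySem.Set.union s (PySem.Set.ofList (PySem.List.pyRange (index - 3) (index + 1) 1))
        PySem.Set.union s (PySem.Set.ofList (PySem.List.pyRange (index + 1) (index + 4) 1)))
        PySem.Set.empty) ↔ ∃ i ∈ indexes, i - 3 ≤ k ∧ k ≤ i + 3 := by
  rw [mem_aSet_aux]
  simp [PySem.Set.empty]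


theorem nodup_aSet_aux (l : List Int) :
    ∀ s : PySem.Set Int, s.Nodup →
      (l.foldl (fun s index =>
          let s := PySem.Set.union s (PySem.Set.ofList (PySem.List.pyRange (index - 3) (index + 1) 1))
          PySem.Set.union s (PySem.Set.ofList (PySem.List.pyRange (index + 1) (index + 4) 1))) s).Nodup := by
  induction l with
  | nil => intro s hs; simpa using hs
  | cons j l ih =>
    intro s hs
    rw [List.foldl_cons]
    exact ih _ (PySem.Set.nodup_union _ _ (PySem.Set.nodup_union _ _ hs))

theorem nodup_aSet (indexes : List Int) :
    (indexes.foldl (fun s index =>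
        let s := PySem.Set.union s (PySem.Set.ofList (PySem.List.pyRange (index - 3) (index + 1) 1))
        PySem.Set.union s (PySem.Set.ofList (PySem.List.pyRange (index + 1) (index + 4) 1)))
        PySem.Set.empty).Nodup := by
  exact nodup_aSet_aux indexes PySem.Set.empty (by simp [PySem.Set.empty])


-- ===== VERDICT (by name: the statement is the Claim_ definition above) =====
theorem find_snippet_spec : Claim_equal_find_snippet := by
  intro dt idx hdom hpre
  obtain ⟨hne, -⟩ := hpre
  unfold Spec_find_snippet
  simp only [find_snippet, find_snippet_alt]
  set T := PySem.List.sorted idx (fun x => x) false with hT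
  set I := (T.foldl bMerge []).reverse with hI
  set U := idx.foldl (fun s index =>
      let s := PySem.Set.union s (PySem.Set.ofList (PySem.List.pyRange (index - 3) (index + 1) 1))
      PySem.Set.union s (PySem.Set.ofList (PySem.List.pyRange (index + 1) (index + 4) 1)))
      PySem.Set.empty with hU
  have hsorted : T.Pairwise (· ≤ ·) := by
    rw [hT]; simpa using PySem.List.sorted_pairwise idx (fun x => x)
  have hinv := inv_foldl T hsorted
  have hwf : WF I := wf_of_inv T _ hinv
  have hTne : T ≠ [] := by
    rw [hT, Ne, PySem.List.sorted_eq_nil_iff]; exact hne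
  have hIne : I ≠ [] := by
    rw [hI]
    simp only [ne_eq, List.reverse_eq_nil_iff]
    intro hc
    exact hTne (hinv.1.mp hc)
  have hPne := points_ne_nil _ hwf hIne
  have hmem : ∀ k : Int, k ∈ points I ↔ k ∈ U := by
    intro k
    rw [mem_points, hU, mem_aSet]
    constructor
    · rintro ⟨q, hq, h1, h2⟩
      rw [hI] at hq
      obtain ⟨i, hiT, hw⟩ := (hinv.2.2.2.2 k).mp ⟨q, List.mem_reverse.mp hq, h1, h2⟩
      rw [hT] at hiT
      exact ⟨i, (PySem.List.mem_sorted _ _ _ _).mp hiT, hw⟩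
    · rintro ⟨i, hiI, hw⟩
      obtain ⟨q, hq, h1, h2⟩ := (hinv.2.2.2.2 k).mpr ⟨i, by rw [hT]; exact (PySem.List.mem_sorted _ _ _ _).mpr hiI, hw⟩
      exact ⟨q, by rw [hI]; exact List.mem_reverse.mpr hq, h1, h2⟩
  have hperm : (points I).Perm U :=
    (List.perm_ext_iff_of_nodup ((points_pairwise _ hwf).imp ne_of_lt)
      (by rw [hU]; exact nodup_aSet idx)).mpr hmem
  have hSP : PySem.List.sorted U (fun x => x) false = points I :=
    PySem.List.sorted_eq_of_perm_of_pairwise_lt U (points I) (fun x => x) hperm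
      (by simpa using points_pairwise _ hwf)
  rw [hSP, aLoop_eq_render, bLoop_eq_render dt _ hwf hIne,
    pyGetD_neg_one_lastD _ hPne, pyGetD_neg_one_lastD _ hIne, points_lastD _ hwf hIne]
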